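-- pv_equiv track=rewrite | github.com/thaisonho/crypto1_openssl | Source/project_03_01/rsa_key_parser.py | format_number
-- ===== SOURCE A (Python) =====
-- def format_number(num: int, name: str, bits: int) -> str:
--     """Format a large number for display."""
--     if bits is None:
--         bits = num.bit_length()
--
--     hex_str = format(num, 'x')
--
--     # Format hex string with colons every 2 characters (OpenSSL style)
--     formatted_hex = ':'.join(hex_str[i:i+2] for i in range(0, len(hex_str), 2))
--
--     # Wrap at 45 characters for readability
--     lines = []
--     current_line = ""
--     for part in formatted_hex.split(':'):
--         if len(current_line) + len(part) + 1 > 45: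
--             lines.append(current_line)
--             current_line = part
--         else:
--             current_line = current_line + ':' + part if current_line else part
--     if current_line:
--         lines.append(current_line)
--
--     wrapped = '\n                '.join(lines)
--
--     return f"    {name} ({bits} bits):\n                {wrapped}"
-- ===== SOURCE B (Python) =====
-- def format_number(num, name, bits):
--     """Format a large number for display (fixed-width row chunking)."""
--     if bits is None:
--         bits = num.bit_length()
--     hex_str = format(num, 'x')
--     # 2-char groups (the last may be a single char)
--     groups = [hex_str[i:i+2] for i in range(0, len(hex_str), 2)]
--     # each group occupies at most 3 characters with its ':' separator, so
--     # exactly per_row = (45 + 1) // 3 = 15 groups fit on every 45-char line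
--     per_row = (45 + 1) // 3
--     rows = [':'.join(groups[r:r+per_row]) for r in range(0, len(groups), per_row)]
--     wrapped = '\n                '.join(rows)
--     return f"    {name} ({bits} bits):\n                {wrapped}"
-- ===== Notes on version B (the rewrite author's own statement) =====
-- stated objective: simpler
-- what changed: Replaces A's greedy character-count wrap loop (and its join-then-resplit of the colon string) by direct fixed-size chunking: since every 2-char hex group occupies at most 3 characters with its ':' separator, exactly (45+1)//3 = 15 groups fit per line, so B slices the group list into rows of 15 and joins them.
import Mathlib
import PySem

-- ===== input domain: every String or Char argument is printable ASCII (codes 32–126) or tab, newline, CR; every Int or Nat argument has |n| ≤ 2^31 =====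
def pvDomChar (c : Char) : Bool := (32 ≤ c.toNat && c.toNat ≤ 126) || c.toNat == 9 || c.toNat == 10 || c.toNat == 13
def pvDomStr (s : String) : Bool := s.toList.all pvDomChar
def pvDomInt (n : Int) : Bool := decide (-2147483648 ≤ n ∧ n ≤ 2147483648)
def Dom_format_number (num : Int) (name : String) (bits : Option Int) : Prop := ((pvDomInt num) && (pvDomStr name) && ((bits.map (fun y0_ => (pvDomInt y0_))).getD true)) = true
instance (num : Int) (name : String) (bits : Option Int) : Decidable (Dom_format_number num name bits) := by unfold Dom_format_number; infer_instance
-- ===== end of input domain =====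

-- B replaces A's greedy character-counting wrap loop by fixed rows of 15 hex groups
-- (15 = (45+1)//3 groups always fill a 45-char line); objective: simpler.

-- shared primitive: format(num, 'x') (Python lowercase hex, '-' prefix for negatives), used verbatim by both sources
def pvHexDigit (n : Nat) : Char := if n < 10 then Char.ofNat (48 + n) else Char.ofNat (87 + n)

def pvHexNat (n : Nat) : List Char :=
  if _h : n < 16 then [pvHexDigit n]
  else pvHexNat (n / 16) ++ [pvHexDigit (n % 16)]
decreasing_by exact Nat.div_lt_self (by omega) (by omega)

def pvHex (num : Int) : List Char :=
  if num < 0 then '-' :: pvHexNat num.natAbs else pvHexNat num.toNat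

-- the literal separator '\n                ' (newline + 16 spaces) both f-strings use
def pvNL : List Char := '\n' :: List.replicate 16 ' '

-- ===== PORT A =====
-- one step of A's greedy wrap loop over the ':'-split parts; state = (lines, current_line)
def pvStepA (st : List (List Char) × List Char) (part : List Char) : List (List Char) × List Char :=
  if st.2.length + part.length + 1 > 45 then (st.1 ++ [st.2], part)
  else (st.1, if st.2.isEmpty then part else st.2 ++ ':' :: part)

def format_number (num : Int) (name : String) (bits : Option Int) : String :=
  let bitsv : Int := match bits with
    | none => (PySem.Int.bitLength num : Int)
    | some b => b
  let hexStr : List Char := pvHex num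
  let formattedHex : List Char :=
    PySem.Chars.join [':']
      ((PySem.List.pyRange 0 (hexStr.length : Int) 2).map
        (fun i => PySem.List.slice hexStr (some i) (some (i + 2))))
  let st := (PySem.Chars.splitOn formattedHex [':']).foldl pvStepA ([], [])
  let lines := if st.2.isEmpty then st.1 else st.1 ++ [st.2]
  let wrapped := PySem.Chars.join pvNL lines
  String.ofList ("    ".toList ++ name.toList ++ " (".toList ++ PySem.Int.toChars bitsv
    ++ " bits):".toList ++ pvNL ++ wrapped)

-- ===== PORT B =====
-- Source B's _chunks(xs, n): successive slices xs[:n], xs[n:] until empty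
def pvChunks {α : Type} (n : Nat) : List α → List (List α)
  | [] => []
  | x :: t => (x :: t).take n :: pvChunks n (t.drop (n - 1))
termination_by xs => xs.length
decreasing_by simp

def format_number_alt (num : Int) (name : String) (bits : Option Int) : String :=
  let bitsv : Int := match bits with
    | none => (PySem.Int.bitLength num : Int)
    | some b => b
  let hexStr : List Char := pvHex num
  let groups := pvChunks 2 hexStr
  let perRow : Nat := (45 + 1) / 3
  let rows := (pvChunks perRow groups).map (fun g => PySem.Chars.join [':'] g)
  let wrapped := PySem.Chars.join pvNL rows
  String.ofList ("    ".toList ++ name.toList ++ " (".toList ++ PySem.Int.toChars bitsv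
    ++ " bits):".toList ++ pvNL ++ wrapped)

-- ===== PRECONDITION & SPEC =====
def Spec_format_number (num : Int) (name : String) (bits : Option Int) (out : String) : Prop := out = format_number_alt num name bits
instance (num : Int) (name : String) (bits : Option Int) (out : String) : Decidable (Spec_format_number num name bits out) := by unfold Spec_format_number; infer_instance

-- ===== CLAIM (what is proved, stated in full; the proofs are below) =====
def Claim_equal_format_number : Prop := ∀ (num : Int) (name : String) (bits : Option Int), Dom_format_number num name bits → Spec_format_number num name bits (format_number num name bits)

-- ===== LEMMAS AND PROOFS =====

-- hex digits are never ':' and hex strings are nonempty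
lemma pvHexDigit_ne_colon (n : Nat) (_h : n < 16) : pvHexDigit n ≠ ':' := by
  interval_cases n <;> decide

lemma pvHexNat_ne_colon (n : Nat) : ∀ c ∈ pvHexNat n, c ≠ ':' := by
  induction n using Nat.strong_induction_on with
  | _ n ih =>
    rw [pvHexNat]
    split
    · rename_i h
      intro c hc
      simp at hc
      subst hc
      exact pvHexDigit_ne_colon n h
    · rename_i h
      intro c hc
      simp at hc
      rcases hc with hc | hc
      · exact ih (n / 16) (Nat.div_lt_self (by omega) (by omega)) c hc
      · subst hc; exact pvHexDigit_ne_colon _ (Nat.mod_lt _ (by omega))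

lemma pvHexNat_ne_nil (n : Nat) : pvHexNat n ≠ [] := by
  rw [pvHexNat]; split <;> simp

lemma pvHex_ne_colon (num : Int) : ∀ c ∈ pvHex num, c ≠ ':' := by
  unfold pvHex
  split
  · intro c hc
    simp at hc
    rcases hc with hc | hc
    · subst hc; decide
    · exact pvHexNat_ne_colon _ c hc
  · exact pvHexNat_ne_colon _

lemma pvHex_ne_nil (num : Int) : pvHex num ≠ [] := by
  unfold pvHex
  split
  · simp
  · exact pvHexNat_ne_nil _

lemma pyRange2 (L : Nat) : (PySem.List.pyRange 0 (L:Int) 2) = (List.range ((L+1)/2)).map (fun k : Nat => (2*(k:Int))) := by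
  rw [PySem.List.pyRange_of_pos 0 (L:Int) (s := 2) (by omega)]
  rcases Nat.eq_zero_or_pos L with h | h
  · subst h; simp
  · have h0 : ((0:Int) < L) := by exact_mod_cast h
    rw [if_pos h0]
    have h1 : (((L:Int) - 0 + 2 - 1) / 2).toNat = (L+1)/2 := by omega
    rw [h1]
    simp

lemma take_chunks2 : ∀ (n : Nat) (cs : List Char), cs.length ≤ n →
    (List.range ((cs.length+1)/2)).map (fun k => (cs.drop (2*k)).take 2) = pvChunks 2 cs := by
  intro n
  induction n with
  | zero =>
    intro cs h
    have hnil : cs = [] := List.length_eq_zero_iff.mp (by omega)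
    subst hnil
    simp [pvChunks]
  | succ n ih =>
    intro cs h
    match cs with
    | [] => simp [pvChunks]
    | [a] => simp [pvChunks]
    | a :: b :: t =>
      have h2 : ((a :: b :: t).length + 1)/2 = (t.length + 1)/2 + 1 := by simp; omega
      rw [h2, List.range_succ_eq_map, List.map_cons, List.map_map]
      have h3 : (List.range ((t.length + 1)/2)).map
          ((fun k => ((a :: b :: t).drop (2*k)).take 2) ∘ Nat.succ)
          = (List.range ((t.length + 1)/2)).map (fun k => (t.drop (2*k)).take 2) := by
        apply List.map_congr_left
        intro k _
        simp only [Function.comp]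
        have e : 2 * Nat.succ k = 2 * k + 2 := by omega
        rw [e]
        rfl
      rw [h3, ih t (by simp at h ⊢; omega)]
      simp [pvChunks]

-- A's slice comprehension computes the 2-chunks
lemma groupsA_eq (cs : List Char) :
    (PySem.List.pyRange 0 (cs.length : Int) 2).map
      (fun i => PySem.List.slice cs (some i) (some (i + 2))) = pvChunks 2 cs := by
  rw [pyRange2, List.map_map, ← take_chunks2 cs.length cs le_rfl]
  apply List.map_congr_left
  intro k _
  simp only [Function.comp]
  have e1 : (2*(k:Int)) = ((2*k : Nat) : Int) := by push_cast; ring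
  have e2 : (2*(k:Int)) + 2 = ((2*k+2 : Nat) : Int) := by push_cast; ring
  rw [e2, e1, PySem.List.slice_natCast]
  congr 1
  omega

-- structure of the 2-chunks
lemma pvChunks2_len : ∀ (n : Nat) (cs : List Char), cs.length ≤ n →
    ∀ g ∈ pvChunks 2 cs, g ≠ [] ∧ g.length ≤ 2 := by
  intro n
  induction n with
  | zero =>
    intro cs h
    have hnil : cs = [] := List.length_eq_zero_iff.mp (by omega)
    subst hnil
    simp [pvChunks]
  | succ n ih =>
    intro cs h
    match cs with
    | [] => simp [pvChunks]
    | [a] => simp [pvChunks]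
    | a :: b :: t =>
      intro g hg
      rw [show pvChunks 2 (a :: b :: t) = [a, b] :: pvChunks 2 t from by simp [pvChunks],
        List.mem_cons] at hg
      rcases hg with hg | hg
      · subst hg; simp
      · exact ih t (by simp at h ⊢; omega) g hg

lemma pvChunks2_dropLast_len : ∀ (n : Nat) (cs : List Char), cs.length ≤ n →
    ∀ g ∈ (pvChunks 2 cs).dropLast, g.length = 2 := by
  intro n
  induction n with
  | zero =>
    intro cs h
    have hnil : cs = [] := List.length_eq_zero_iff.mp (by omega)
    subst hnil
    simp [pvChunks]
  | succ n ih =>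
    intro cs h
    match cs with
    | [] => simp [pvChunks]
    | [a] => simp [pvChunks]
    | a :: b :: t =>
      intro g hg
      rw [show pvChunks 2 (a :: b :: t) = [a, b] :: pvChunks 2 t from by simp [pvChunks]] at hg
      rcases eq_or_ne (pvChunks 2 t) [] with h0 | h0
      · rw [h0] at hg; simp at hg
      · rw [List.dropLast_cons_of_ne_nil h0, List.mem_cons] at hg
        rcases hg with hg | hg
        · subst hg; simp
        · exact ih t (by simp at h ⊢; omega) g hg

lemma pvChunks2_mem_colon : ∀ (n : Nat) (cs : List Char), cs.length ≤ n →
    (∀ c ∈ cs, c ≠ ':') → ∀ g ∈ pvChunks 2 cs, ∀ c ∈ g, c ≠ ':' := by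
  intro n
  induction n with
  | zero =>
    intro cs hl h
    have hnil : cs = [] := List.length_eq_zero_iff.mp (by omega)
    subst hnil
    simp [pvChunks]
  | succ n ih =>
    intro cs hl h
    match cs with
    | [] => simp [pvChunks]
    | [a] => simpa [pvChunks] using h
    | a :: b :: t =>
      intro g hg
      rw [show pvChunks 2 (a :: b :: t) = [a, b] :: pvChunks 2 t from by simp [pvChunks],
        List.mem_cons] at hg
      rcases hg with hg | hg
      · subst hg
        intro c hc
        simp at hc
        rcases hc with hc | hc
        · exact hc ▸ h a (by simp)
        · exact hc ▸ h b (by simp)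
      · have ht : ∀ c ∈ t, c ≠ ':' := by
          intro c hc; exact h c (by simp [hc])
        exact ih t (by simp at hl ⊢; omega) ht g hg

-- join / splitOn roundtrip for ':'-free groups
lemma go_cons_ne (f : Nat) (c : Char) (rest cur : List Char) (acc : List (List Char)) (h : c ≠ ':') :
    PySem.Chars.splitOn.go [':'] (f+1) (c :: rest) cur acc
      = PySem.Chars.splitOn.go [':'] f rest (c :: cur) acc := by
  rw [PySem.Chars.splitOn.go]
  simp [List.isPrefixOf, Ne.symm h]

lemma go_cons_colon (f : Nat) (rest cur : List Char) (acc : List (List Char)) :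
    PySem.Chars.splitOn.go [':'] (f+1) (':' :: rest) cur acc
      = PySem.Chars.splitOn.go [':'] f rest [] (cur.reverse :: acc) := by
  rw [PySem.Chars.splitOn.go]
  simp [List.isPrefixOf]

lemma go_nil (f : Nat) (cur : List Char) (acc : List (List Char)) :
    PySem.Chars.splitOn.go [':'] f [] cur acc = (cur.reverse :: acc).reverse := by
  cases f <;> rw [PySem.Chars.splitOn.go] <;> simp

-- go consumes a ':'-free prefix into cur
lemma go_no_colon (g : List Char) : ∀ (fuel : Nat) (l cur : List Char) (acc : List (List Char)),
    (∀ c ∈ g, c ≠ ':') → g.length ≤ fuel →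
    PySem.Chars.splitOn.go [':'] fuel (g ++ l) cur acc
      = PySem.Chars.splitOn.go [':'] (fuel - g.length) l (g.reverse ++ cur) acc := by
  induction g with
  | nil => intro fuel l cur acc _ _; simp
  | cons c g' ih =>
    intro fuel l cur acc hc hf
    match fuel with
    | f + 1 =>
      rw [List.cons_append, go_cons_ne f _ _ _ _ (hc c (by simp)),
        ih f l (c :: cur) acc (fun x hx => hc x (by simp [hx])) (by simp at hf; omega)]
      have e : (f+1) - (c :: g').length = f - g'.length := by simp
      rw [e]
      simp

lemma go_join (gs' : List (List Char)) : ∀ (g : List Char) (fuel : Nat) (cur : List Char)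
    (acc : List (List Char)),
    (∀ h ∈ g :: gs', ∀ c ∈ h, c ≠ ':') →
    (PySem.Chars.join [':'] (g :: gs')).length ≤ fuel →
    PySem.Chars.splitOn.go [':'] fuel (PySem.Chars.join [':'] (g :: gs')) cur acc
      = acc.reverse ++ (cur.reverse ++ g) :: gs' := by
  induction gs' with
  | nil =>
    intro g fuel cur acc hc hf
    rw [PySem.Chars.join_singleton] at hf ⊢
    rw [show g = g ++ [] from by simp, go_no_colon g fuel [] cur acc (hc g (by simp)) (by omega),
      go_nil]
    simp
  | cons g2 t ih =>
    intro g fuel cur acc hc hf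
    rw [PySem.Chars.join_cons_cons] at hf ⊢
    have hlen : g.length + 1 + (PySem.Chars.join [':'] (g2 :: t)).length ≤ fuel := by
      simp at hf; omega
    rw [show g ++ [':'] ++ PySem.Chars.join [':'] (g2 :: t)
        = g ++ (':' :: PySem.Chars.join [':'] (g2 :: t)) from by simp,
      go_no_colon g fuel _ cur acc (hc g (by simp)) (by omega)]
    have hfe : fuel - g.length = (fuel - g.length - 1) + 1 := by omega
    rw [hfe, go_cons_colon,
      ih g2 (fuel - g.length - 1) [] _ (fun h hh => hc h (by simp at hh ⊢; tauto)) (by omega)]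
    simp

lemma splitOn_join (gs : List (List Char)) (hne : gs ≠ [])
    (h2 : ∀ g ∈ gs, ∀ c ∈ g, c ≠ ':') :
    PySem.Chars.splitOn (PySem.Chars.join [':'] gs) [':'] = gs := by
  match gs with
  | g :: gs' =>
    unfold PySem.Chars.splitOn
    rw [go_join gs' g _ [] [] h2 (by omega)]
    simp

-- finalize: A's trailing 'if current_line: lines.append(current_line)'
def pvFin (st : List (List Char) × List Char) : List (List Char) :=
  if st.2.isEmpty then st.1 else st.1 ++ [st.2]

-- join with ':' unfolded to a flatten
lemma join_colon_eq (seg : List (List Char)) : ∀ p : List Char,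
    PySem.Chars.join [':'] (p :: seg) = p ++ (seg.map (fun g => ':' :: g)).flatten := by
  induction seg with
  | nil => intro p; simp [PySem.Chars.join_singleton]
  | cons g t ih =>
    intro p
    rw [PySem.Chars.join_cons_cons, ih g]
    simp

lemma flatten_colon_len (seg : List (List Char)) (h : ∀ g ∈ seg, g.length = 2) :
    ((seg.map (fun g => ':' :: g)).flatten).length = 3 * seg.length := by
  induction seg with
  | nil => simp
  | cons g t ih =>
    simp only [List.map_cons, List.flatten_cons, List.length_append, List.length_cons]
    rw [ih (fun x hx => h x (by simp [hx])), h g (by simp)]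
    simp
    omega

-- the greedy loop never breaks while the line stays short enough
lemma foldl_stepA_nobreak (seg : List (List Char)) : ∀ (lines : List (List Char)) (cur : List Char),
    cur ≠ [] → cur.length + 3 * seg.length ≤ 45 → (∀ g ∈ seg, g.length ≤ 2) →
    seg.foldl pvStepA (lines, cur) = (lines, cur ++ (seg.map (fun g => ':' :: g)).flatten) := by
  induction seg with
  | nil => intro lines cur _ _ _; simp
  | cons g t ih =>
    intro lines cur hcur hle hlen
    have hg : g.length ≤ 2 := hlen g (by simp)
    have hc1 : ¬ (cur.length + g.length + 1 > 45) := by simp at hle ⊢; omega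
    have hc2 : cur.isEmpty = false := by simpa [List.isEmpty_iff] using hcur
    rw [List.foldl_cons, show pvStepA (lines, cur) g = (lines, cur ++ ':' :: g) from by
        simp [pvStepA, hc1, hc2],
      ih lines (cur ++ ':' :: g) (by simp) (by simp at hle ⊢; omega)
        (fun x hx => hlen x (by simp [hx]))]
    simp

-- the greedy loop fills exactly 15 groups per line
lemma greedy_run : ∀ (n : Nat) (gs : List (List Char)) (p : List Char) (lines : List (List Char)),
    gs.length ≤ n → p ≠ [] → p.length ≤ 2 →
    (∀ g ∈ (p :: gs).dropLast, g.length = 2) →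
    (∀ g ∈ gs, g ≠ [] ∧ g.length ≤ 2) →
    pvFin (gs.foldl pvStepA (lines, p))
      = lines ++ (pvChunks 15 (p :: gs)).map (fun g => PySem.Chars.join [':'] g) := by
  intro n
  induction n with
  | zero =>
    intro gs p lines hn hp hp2 hfull hlen
    have : gs = [] := List.length_eq_zero_iff.mp (by omega)
    subst this
    simp [pvFin, List.isEmpty_iff, hp, pvChunks, PySem.Chars.join_singleton]
  | succ n ih =>
    intro gs p lines hn hp hp2 hfull hlen
    by_cases hsmall : gs.length ≤ 14
    · -- everything fits on one line
      rw [foldl_stepA_nobreak gs lines p hp (by omega) (fun g hg => (hlen g hg).2)]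
      have hchunk : pvChunks 15 (p :: gs) = [p :: gs] := by
        rw [pvChunks, List.take_of_length_le (by simp; omega),
          List.drop_of_length_le (by omega)]
        simp [pvChunks]
      rw [hchunk]
      simp [pvFin, List.isEmpty_iff, hp, join_colon_eq]
    · -- a full line of 15 groups, then recurse
      have hsmall : 14 < gs.length := by omega
      have hsplit : gs = gs.take 14 ++ gs.drop 14 := (List.take_append_drop 14 gs).symm
      obtain ⟨g15, rest, hdrop⟩ : ∃ g15 rest, gs.drop 14 = g15 :: rest := by
        match h : gs.drop 14 with
        | [] =>
          have hd := congrArg List.length h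
          simp at hd
          omega
        | a :: b => exact ⟨a, b, rfl⟩
      have hmem_take : ∀ g ∈ gs.take 14, g ∈ (p :: gs).dropLast := by
          intro g hg
          rw [List.dropLast_cons_of_ne_nil (by intro h; subst h; simp at hsmall),
            List.mem_cons]
          right
          rw [List.dropLast_eq_take] at *
          have : gs.take 14 = (gs.take (gs.length - 1)).take 14 := by
            rw [List.take_take]
            congr 1
            omega
          rw [this] at hg
          exact List.take_subset _ _ hg
      have hp2' : p.length = 2 := hfull p (by
        rw [List.dropLast_cons_of_ne_nil (by intro h; subst h; simp at hsmall)]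
        simp)
      have htake2 : ∀ g ∈ gs.take 14, g.length = 2 := fun g hg => hfull g (hmem_take g hg)
      -- run the first 14 groups without a break
      conv_lhs => rw [hsplit, List.foldl_append]
      rw [foldl_stepA_nobreak (gs.take 14) lines p hp
        (by rw [hp2']; simp [List.length_take]; omega)
        (fun g hg => by rw [htake2 g hg]), hdrop]
      set cur1 := p ++ ((gs.take 14).map (fun g => ':' :: g)).flatten with hcur1
      have hcur1len : cur1.length = 44 := by
        rw [hcur1]
        simp only [List.length_append, flatten_colon_len _ htake2, hp2']
        rw [List.length_take]
        omega
      have hg15 : g15 ∈ gs := by rw [hsplit, hdrop]; simp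
      have hg15ne : g15 ≠ [] := (hlen g15 hg15).1
      have hbreak : cur1.length + g15.length + 1 > 45 := by
        rw [hcur1len]
        have : g15.length ≥ 1 := by
          cases g15
          · exact absurd rfl hg15ne
          · simp
        omega
      rw [List.foldl_cons, show pvStepA (lines, cur1) g15 = (lines ++ [cur1], g15) from by
        simp [pvStepA, hbreak]]
      -- recurse on the remaining groups
      have hrest_sub : ∀ g ∈ rest, g ∈ gs := by
        intro g hg
        have hgd : g ∈ gs.drop 14 := by rw [hdrop]; simp [hg]
        exact List.drop_subset _ _ hgd
      have hrestlen : rest.length ≤ n := by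
        have := congrArg List.length hdrop
        simp at this
        omega
      have hfull' : ∀ g ∈ (g15 :: rest).dropLast, g.length = 2 := by
        intro g hg
        rw [← hdrop] at hg
        have hg' : g ∈ gs.dropLast := by
          rw [List.dropLast_eq_take] at hg ⊢
          rw [List.take_drop] at hg
          have he : 14 + ((gs.drop 14).length - 1) = gs.length - 1 := by
            simp
            omega
          rw [he] at hg
          exact List.drop_subset _ _ hg
        apply hfull
        rw [List.dropLast_cons_of_ne_nil (by intro h; subst h; simp at hsmall),
          List.mem_cons]
        right
        exact hg' 
      rw [ih rest g15 (lines ++ [cur1]) hrestlen hg15ne (hlen g15 hg15).2 hfull'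
        (fun g hg => hlen g (hrest_sub g hg))]
      -- reassemble the chunk structure
      have hchunk : pvChunks 15 (p :: gs) = (p :: gs.take 14) :: pvChunks 15 (g15 :: rest) := by
        rw [pvChunks,
          show gs.drop (15 - 1) = g15 :: rest from by
            rw [show (15 : Nat) - 1 = 14 from rfl]; exact hdrop,
          show (p :: gs).take 15 = p :: gs.take 14 from by simp]
      rw [hchunk]
      simp only [List.map_cons, List.append_assoc, List.cons_append, List.nil_append]
      congr 2
      rw [join_colon_eq]

lemma pvChunks2_ne_nil (cs : List Char) (h : cs ≠ []) : pvChunks 2 cs ≠ [] := by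
  cases cs
  · exact absurd rfl h
  · simp [pvChunks]

-- the two wrapped hex bodies agree
lemma wrapped_eq (num : Int) :
    (let hexStr : List Char := pvHex num;
     let st := (PySem.Chars.splitOn
        (PySem.Chars.join [':']
          ((PySem.List.pyRange 0 (hexStr.length : Int) 2).map
            (fun i => PySem.List.slice hexStr (some i) (some (i + 2))))) [':']).foldl
        pvStepA ([], []);
     if st.2.isEmpty then st.1 else st.1 ++ [st.2])
    = (pvChunks ((45 + 1) / 3) (pvChunks 2 (pvHex num))).map
        (fun g => PySem.Chars.join [':'] g) := by
  have hne := pvHex_ne_nil num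
  rw [show ((45 + 1) / 3 : Nat) = 15 from rfl]
  simp only [groupsA_eq (pvHex num),
    splitOn_join (pvChunks 2 (pvHex num)) (pvChunks2_ne_nil _ hne)
      (pvChunks2_mem_colon (pvHex num).length (pvHex num) le_rfl (pvHex_ne_colon num))]
  obtain ⟨g, rest, hgr⟩ : ∃ g rest, pvChunks 2 (pvHex num) = g :: rest := by
    match h : pvChunks 2 (pvHex num) with
    | [] => exact absurd h (pvChunks2_ne_nil _ hne)
    | a :: b => exact ⟨a, b, rfl⟩
  rw [hgr]
  have hg : g ≠ [] ∧ g.length ≤ 2 :=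
    pvChunks2_len (pvHex num).length (pvHex num) le_rfl g (by rw [hgr]; simp)
  have hstep : pvStepA ([], []) g = ([], g) := by
    simp [pvStepA]
    omega
  rw [List.foldl_cons, hstep]
  have := greedy_run rest.length rest g [] le_rfl hg.1 hg.2
    (by rw [← hgr]; exact pvChunks2_dropLast_len (pvHex num).length (pvHex num) le_rfl)
    (fun x hx => pvChunks2_len (pvHex num).length (pvHex num) le_rfl x (by rw [hgr]; simp [hx]))
  unfold pvFin at this
  rw [this]
  simp

-- ===== VERDICT (by name: the statement is the Claim_ definition above) =====
theorem format_number_spec : Claim_equal_format_number := by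
  intro num name bits _
  unfold Spec_format_number format_number format_number_alt
  have h := wrapped_eq num
  simp only [] at h ⊢
  rw [h]
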